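-- pv_equiv track=rewrite | github.com/LuisPereraPerez/BigData_IndividualAsignments | assignment4/python/prueba3.py | reducer_part1
-- ===== SOURCE A (Python) =====
-- def reducer_part1(key, values):
--     A_rows = {}  # Diccionario de filas de A
--     B_columns = {}  # Diccionario de columnas de B
--
--     # Recolectamos las filas de A y las columnas de B
--     for val in values:
--         if val[0] == 'A':
--             col_index, value = val[1], val[2]  # val[1] = col_index, val[2] = value
--             if col_index not in A_rows:
--                 A_rows[col_index] = []
--             A_rows[col_index].append(value)  # Guardar valor de la fila de A
--         elif val[0] == 'B':
--             row_index, value = val[1], val[2]  # val[1] = row_index, val[2] = value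
--             if row_index not in B_columns:
--                 B_columns[row_index] = []
--             B_columns[row_index].append(value)  # Guardar valor de la columna de B
--
--     # Realizamos el producto de matrices
--     results = {}
--
--     # Producto punto entre las filas de A y las columnas de B
--     for i in A_rows:  # Recorremos las columnas de A
--         for j in B_columns:  # Recorremos las filas de B
--             if len(A_rows[i]) == len(B_columns[j]):  # Aseguramos que las dimensiones coincidan
--                 s = 0  # Inicializamos la variable de acumulación
--
--                 # Realizamos el producto punto entre la fila de A y la columna de B
--                 for k in range(len(A_rows[i])):
--                     s += A_rows[i][k] * B_columns[j][k]  # Acumulamos el resultado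
--
--                 # Aseguramos que la clave (i, j) exista antes de acumular
--                 if (i, j) not in results:
--                     results[(i, j)] = 0  # Inicializamos si no existe
--                 results[(i, j)] += s  # Acumulamos los resultados para cada posición
--
--     # Emitimos los resultados acumulados
--     for key, value in results.items():
--         yield (key, value)
-- ===== SOURCE B (Python) =====
-- def reducer_part1(key, values):
--     A_rows = {}
--     B_columns = {}
--     for tag, idx, value in values:
--         if tag == 'A':
--             A_rows.setdefault(idx, []).append(value)
--         elif tag == 'B':
--             B_columns.setdefault(idx, []).append(value)
--
--     # Index B columns by their length so each A row scans only matching columns.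
--     B_by_len = {}
--     for j, col in B_columns.items():
--         B_by_len.setdefault(len(col), []).append((j, col))
--
--     for i, row in A_rows.items():
--         for j, col in B_by_len.get(len(row), []):
--             yield ((i, j), sum(a * b for a, b in zip(row, col)))
-- ===== Notes on version B (the rewrite author's own statement) =====
-- stated objective: alternative
-- what changed: B replaces A's all-pairs scan (every A row against every B column with a length test) and intermediate results dict by a one-pass index of B columns keyed on their length, then yields each dot product (computed as sum over zip instead of indexed accumulation) directly while iterating only the matching-length columns.
import Mathlib
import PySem

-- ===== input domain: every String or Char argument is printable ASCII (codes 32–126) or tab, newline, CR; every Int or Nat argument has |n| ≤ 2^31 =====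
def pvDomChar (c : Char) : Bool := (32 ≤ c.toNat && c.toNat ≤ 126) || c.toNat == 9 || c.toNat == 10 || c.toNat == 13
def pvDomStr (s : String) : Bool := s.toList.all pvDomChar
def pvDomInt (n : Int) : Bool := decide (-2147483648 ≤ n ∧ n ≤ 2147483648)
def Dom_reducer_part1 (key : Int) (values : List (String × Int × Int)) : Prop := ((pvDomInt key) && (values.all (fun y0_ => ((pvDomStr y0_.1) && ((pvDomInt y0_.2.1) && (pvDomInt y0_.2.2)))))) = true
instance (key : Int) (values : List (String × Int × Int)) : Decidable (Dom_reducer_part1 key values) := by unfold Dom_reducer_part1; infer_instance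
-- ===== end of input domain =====

-- B replaces A's all-pairs scan over B_columns by an index keyed on column length and yields
-- the dot products directly, without the intermediate results dict (objective: alternative).

-- ===== PORT A =====
-- the first loop of A: bucket the 'A' triples by col_index and the 'B' triples by row_index
def pvA_collect (values : List (String × Int × Int)) :
    PySem.Dict Int (List Int) × PySem.Dict Int (List Int) :=
  values.foldl (fun ab val =>
    if val.1 == "A" then
      ((if ab.1.contains val.2.1 then ab.1 else ab.1.insert val.2.1 []).modify val.2.1 []
        (· ++ [val.2.2]), ab.2)
    else if val.1 == "B" then
      (ab.1, (if ab.2.contains val.2.1 then ab.2 else ab.2.insert val.2.1 []).modify val.2.1 []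
        (· ++ [val.2.2]))
    else ab)
    (PySem.Dict.empty, PySem.Dict.empty)

-- A's innermost loop: s accumulated over range(len(A_rows[i]))
def pvA_dot (row col : List Int) : Int :=
  (PySem.List.pyRange 0 (PySem.List.len row)).foldl
    (fun s k => s + PySem.List.pyGetD row k 0 * PySem.List.pyGetD col k 0) 0

-- A's inner 'for j in B_columns' loop, updating the results dict
def pvA_inner (A_rows B_columns : PySem.Dict Int (List Int))
    (res : PySem.Dict (Int × Int) Int) (i : Int) : PySem.Dict (Int × Int) Int :=
  B_columns.keys.foldl (fun res j =>
    if PySem.List.len (A_rows.getD i []) == PySem.List.len (B_columns.getD j []) then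
      (if res.contains (i, j) then res else res.insert (i, j) 0).modify (i, j) 0
        (· + pvA_dot (A_rows.getD i []) (B_columns.getD j []))
    else res) res

def reducer_part1 (key : Int) (values : List (String × Int × Int)) : List ((Int × Int) × Int) :=
  let ab := pvA_collect values
  (ab.1.keys.foldl (pvA_inner ab.1 ab.2) PySem.Dict.empty).items

-- ===== PORT B =====
-- B's bucket loop (setdefault(idx, []).append(value))
def pvB_collect (values : List (String × Int × Int)) :
    PySem.Dict Int (List Int) × PySem.Dict Int (List Int) :=
  values.foldl (fun ab val =>
    match val with
    | (tag, idx, value) =>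
      if tag == "A" then ((ab.1.setdefault idx []).modify idx [] (· ++ [value]), ab.2)
      else if tag == "B" then (ab.1, (ab.2.setdefault idx []).modify idx [] (· ++ [value]))
      else ab)
    (PySem.Dict.empty, PySem.Dict.empty)

-- B's index: column length -> list of (j, column), in B_columns insertion order
def pvB_index (bcols : PySem.Dict Int (List Int)) : PySem.Dict Int (List (Int × List Int)) :=
  bcols.items.foldl (fun d p =>
    (d.setdefault (PySem.List.len p.2) []).modify (PySem.List.len p.2) [] (· ++ [p]))
    PySem.Dict.empty

-- sum(a * b for a, b in zip(row, col))
def pvB_dot (row col : List Int) : Int :=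
  ((row.zip col).map (fun q => q.1 * q.2)).sum

def reducer_part1_alt (key : Int) (values : List (String × Int × Int)) :
    List ((Int × Int) × Int) :=
  let ab := pvB_collect values
  let byLen := pvB_index ab.2
  ab.1.items.foldl (fun out p =>
    out ++ (byLen.getD (PySem.List.len p.2) []).map (fun q => ((p.1, q.1), pvB_dot p.2 q.2))) []

-- ===== PRECONDITION & SPEC =====
def Spec_reducer_part1 (key : Int) (values : List (String × Int × Int)) (out : List ((Int × Int) × Int)) : Prop := out = reducer_part1_alt key values
instance (key : Int) (values : List (String × Int × Int)) (out : List ((Int × Int) × Int)) : Decidable (Spec_reducer_part1 key values out) := by unfold Spec_reducer_part1; infer_instance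

-- ===== CLAIM (what is proved, stated in full; the proofs are below) =====
def Claim_equal_reducer_part1 : Prop := ∀ (key : Int) (values : List (String × Int × Int)), Dom_reducer_part1 key values → Spec_reducer_part1 key values (reducer_part1 key values)

-- ===== LEMMAS AND PROOFS =====

theorem dict_if_insert_eq_setdefault {κ ν : Type} [BEq κ] (d : PySem.Dict κ ν) (k : κ) (v0 : ν) :
    (if d.contains k then d else d.insert k v0) = d.setdefault k v0 := by
  by_cases h : d.contains k <;>
    simp [h, PySem.Dict.setdefault_of_contains, PySem.Dict.setdefault_of_not_contains]

theorem dict_setdefault_modify {κ ν : Type} [BEq κ] [LawfulBEq κ]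
    (d : PySem.Dict κ ν) (k : κ) (v0 : ν) (f : ν → ν) :
    (d.setdefault k v0).modify k v0 f = d.modify k v0 f := by
  by_cases h : d.contains k
  · rw [PySem.Dict.setdefault_of_contains _ _ h]
  · rw [PySem.Dict.setdefault_of_not_contains _ _ (by simpa using h)]
    simp [PySem.Dict.modify, PySem.Dict.getD_insert_self, PySem.Dict.insert_insert_self,
      PySem.Dict.getD_of_not_contains _ _ (by simpa using h)]

-- the canonical form of the bucket loop both ports reduce to
def pvFA (d : PySem.Dict Int (List Int)) (val : String × Int × Int) : PySem.Dict Int (List Int) :=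
  if val.1 == "A" then d.modify val.2.1 [] (· ++ [val.2.2]) else d

def pvFB (d : PySem.Dict Int (List Int)) (val : String × Int × Int) : PySem.Dict Int (List Int) :=
  if val.1 == "B" then d.modify val.2.1 [] (· ++ [val.2.2]) else d

theorem pvA_collect_eq (values : List (String × Int × Int)) :
    pvA_collect values = (values.foldl pvFA PySem.Dict.empty, values.foldl pvFB PySem.Dict.empty) := by
  unfold pvA_collect
  rw [show (fun (ab : PySem.Dict Int (List Int) × PySem.Dict Int (List Int)) val =>
      if val.1 == "A" then
        ((if ab.1.contains val.2.1 then ab.1 else ab.1.insert val.2.1 []).modify val.2.1 []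
          (· ++ [val.2.2]), ab.2)
      else if val.1 == "B" then
        (ab.1, (if ab.2.contains val.2.1 then ab.2 else ab.2.insert val.2.1 []).modify val.2.1 []
          (· ++ [val.2.2]))
      else ab) = (fun ab val => (pvFA ab.1 val, pvFB ab.2 val)) from ?_,
    PySem.List.foldl_prod_mk]
  funext ab val
  unfold pvFA pvFB
  by_cases h1 : val.1 == "A" <;> by_cases h2 : val.1 == "B" <;>
    simp_all [dict_if_insert_eq_setdefault, dict_setdefault_modify]

theorem pvB_collect_eq (values : List (String × Int × Int)) :
    pvB_collect values = pvA_collect values := by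
  rw [pvA_collect_eq]
  unfold pvB_collect
  rw [show (fun (ab : PySem.Dict Int (List Int) × PySem.Dict Int (List Int))
        (val : String × Int × Int) =>
      match val with
      | (tag, idx, value) =>
        if tag == "A" then ((ab.1.setdefault idx []).modify idx [] (· ++ [value]), ab.2)
        else if tag == "B" then (ab.1, (ab.2.setdefault idx []).modify idx [] (· ++ [value]))
        else ab) = (fun ab val => (pvFA ab.1 val, pvFB ab.2 val)) from ?_,
    PySem.List.foldl_prod_mk]
  funext ab val
  obtain ⟨tag, idx, value⟩ := val
  unfold pvFA pvFB
  by_cases h1 : tag == "A" <;> by_cases h2 : tag == "B" <;>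
    simp_all [dict_setdefault_modify]

theorem pvFA_nodup (values : List (String × Int × Int)) :
    (values.foldl pvFA PySem.Dict.empty).keys.Nodup := by
  unfold pvFA
  rw [PySem.List.foldl_if_eq_foldl_filter (fun (val : String × Int × Int) => val.1 == "A")
    (fun (d : PySem.Dict Int (List Int)) (val : String × Int × Int) => d.modify val.2.1 [] (· ++ [val.2.2])) values
    PySem.Dict.empty]
  exact PySem.Dict.nodup_keys_foldl_modify_key _ (fun (val : String × Int × Int) => val.2.1) []
    (fun _ (val : String × Int × Int) (x : List Int) => x ++ [val.2.2]) _ (by exact List.nodup_nil)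

theorem pvFB_nodup (values : List (String × Int × Int)) :
    (values.foldl pvFB PySem.Dict.empty).keys.Nodup := by
  unfold pvFB
  rw [PySem.List.foldl_if_eq_foldl_filter (fun (val : String × Int × Int) => val.1 == "B")
    (fun (d : PySem.Dict Int (List Int)) (val : String × Int × Int) => d.modify val.2.1 [] (· ++ [val.2.2])) values
    PySem.Dict.empty]
  exact PySem.Dict.nodup_keys_foldl_modify_key _ (fun (val : String × Int × Int) => val.2.1) []
    (fun _ (val : String × Int × Int) (x : List Int) => x ++ [val.2.2]) _ (by exact List.nodup_nil)

-- characterisation of B's length index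
theorem pvB_index_getD (bc : PySem.Dict Int (List Int)) (L : Int) :
    (pvB_index bc).getD L [] = bc.items.filter (fun p => PySem.List.len p.2 == L) := by
  unfold pvB_index
  have hf : (fun (d : PySem.Dict Int (List (Int × List Int))) (p : Int × List Int) =>
      (d.setdefault (PySem.List.len p.2) []).modify (PySem.List.len p.2) [] (· ++ [p]))
      = (fun d p => d.modify (PySem.List.len p.2) [] (· ++ [p])) := by
    funext d p; exact dict_setdefault_modify _ _ _ _
  rw [hf]
  have h := PySem.Dict.getD_foldl_modify_append
    (bc.items.map (fun p => (PySem.List.len p.2, p))) PySem.Dict.empty L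
  rw [List.foldl_map] at h
  simp only [h, PySem.Dict.getD_empty, List.nil_append, List.filter_map]
  simp [Function.comp_def]

-- A's index-based dot product equals B's zip-based one on equal lengths
theorem pv_dot_eq (row col : List Int) (h : row.length = col.length) :
    pvA_dot row col = pvB_dot row col := by
  unfold pvA_dot pvB_dot
  rw [PySem.List.foldl_add]
  simp only [PySem.List.len_eq, PySem.List.pyRange_zero_natCast, List.map_map, zero_add]
  induction row generalizing col with
  | nil => simp
  | cons a t ih =>
    cases col with
    | nil => simp at h
    | cons b c =>
      rw [List.length_cons, List.range_succ_eq_map]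
      simp only [List.map_cons, List.map_map, List.sum_cons, List.zip_cons_cons]
      have : ∀ k : Nat, ((a :: t).getD (k + 1) 0 * (b :: c).getD (k + 1) 0) = t.getD k 0 * c.getD k 0 := by
        intro k; simp [List.getD]
      simp only [Function.comp_def, PySem.List.pyGetD_natCast] at *
      simp only [List.getD_cons_zero, List.getD_cons_succ]
      rw [ih c (by simpa using h)]

-- the inner loop over B's keys appends one entry per matching-length column
theorem pv_inner_items (A B : PySem.Dict Int (List Int)) (i : Int) :
    ∀ (js : List Int) (res : PySem.Dict (Int × Int) Int), js.Nodup →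
      (∀ j ∈ js, res.contains (i, j) = false) →
      (js.foldl (fun res j =>
        if PySem.List.len (A.getD i []) == PySem.List.len (B.getD j []) then
          (if res.contains (i, j) then res else res.insert (i, j) 0).modify (i, j) 0
            (· + pvA_dot (A.getD i []) (B.getD j []))
        else res) res).items
      = res.items ++ (js.filter (fun j =>
          PySem.List.len (A.getD i []) == PySem.List.len (B.getD j []))).map
          (fun j => ((i, j), pvA_dot (A.getD i []) (B.getD j []))) := by
  intro js
  induction js with
  | nil => intro res _ _; simp
  | cons j t ih =>
    intro res hnd h
    have hj : res.contains (i, j) = false := h j (by simp)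
    by_cases hc : PySem.List.len (A.getD i []) == PySem.List.len (B.getD j [])
    · have hstep : (if res.contains (i, j) then res else res.insert (i, j) 0).modify (i, j) 0
          (· + pvA_dot (A.getD i []) (B.getD j []))
          = res.insert (i, j) (pvA_dot (A.getD i []) (B.getD j [])) := by
        rw [hj]
        simp [PySem.Dict.modify, PySem.Dict.getD_insert_self, PySem.Dict.insert_insert_self]
      simp only [List.foldl_cons, hc, if_true, hstep]
      rw [ih _ (by exact hnd.of_cons) ?_]
      · rw [PySem.Dict.items_insert_of_not_contains _ _ hj]
        have hlen : (A.getD i []).length = (B.getD j []).length := by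
          simpa [PySem.List.len_eq] using hc
        simp [hlen]
      · intro j' hj'
        rw [PySem.Dict.contains_insert]
        have hne : j' ≠ j := by
          rintro rfl; exact (List.nodup_cons.mp hnd).1 hj'
        simp [hne, h j' (List.mem_cons_of_mem _ hj')]
    · simp only [List.foldl_cons, hc, if_false, Bool.false_eq_true]
      rw [ih _ hnd.of_cons (fun j' hj' => h j' (List.mem_cons_of_mem _ hj'))]
      have hlen : ¬ (A.getD i []).length = (B.getD j []).length := by
        simpa [PySem.List.len_eq] using hc
      simp [hlen]

-- the outer loop over A's keys concatenates the inner results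
theorem pv_outer_items (A B : PySem.Dict Int (List Int)) (hB : B.keys.Nodup) :
    ∀ (iss : List Int) (res : PySem.Dict (Int × Int) Int), iss.Nodup →
      (∀ i ∈ iss, ∀ j, res.contains (i, j) = false) →
      (iss.foldl (pvA_inner A B) res).items = res.items ++ iss.flatMap (fun i =>
        (B.keys.filter (fun j =>
          PySem.List.len (A.getD i []) == PySem.List.len (B.getD j []))).map
          (fun j => ((i, j), pvA_dot (A.getD i []) (B.getD j [])))) := by
  intro iss
  induction iss with
  | nil => intro res _ _; simp
  | cons i t ih =>
    intro res hnd h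
    have hinner := pv_inner_items A B i B.keys (pvA_inner A B res i) hB
    have hres : (pvA_inner A B res i).items = res.items ++
        (B.keys.filter (fun j =>
          PySem.List.len (A.getD i []) == PySem.List.len (B.getD j []))).map
          (fun j => ((i, j), pvA_dot (A.getD i []) (B.getD j []))) := by
      unfold pvA_inner
      exact pv_inner_items A B i B.keys res hB (fun j _ => h i (by simp) j)
    simp only [List.foldl_cons]
    rw [ih (pvA_inner A B res i) hnd.of_cons ?_, hres]
    · simp [List.flatMap_cons]
    · intro i' hi' j
      have hcf : res.contains (i', j) = false := h i' (List.mem_cons_of_mem _ hi') j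
      cases hcb : (pvA_inner A B res i).contains (i', j) with
      | false => rfl
      | true =>
        exfalso
        rw [PySem.Dict.contains_iff_mem_keys] at hcb
        have hcb' : (i', j) ∈ (res.items ++
            (B.keys.filter (fun j =>
              PySem.List.len (A.getD i []) == PySem.List.len (B.getD j []))).map
              (fun j => ((i, j), pvA_dot (A.getD i []) (B.getD j [])))).map (fun p => p.1) := by
          simpa only [PySem.Dict.keys, hres] using hcb
        rw [List.map_append, List.mem_append] at hcb'
        rcases hcb' with hm | hm
        · have hm' : (i', j) ∈ res.keys := hm
          rw [← PySem.Dict.contains_iff_mem_keys, hcf] at hm'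
          cases hm'
        · simp only [List.map_map, Function.comp_def, List.mem_map] at hm
          obtain ⟨j', _, hj'⟩ := hm
          have hii : i = i' := congrArg Prod.fst hj'
          exact (List.nodup_cons.mp hnd).1 (hii ▸ hi')

-- one row of the output: B's indexed inner loop equals A's filtered scan of B_columns
theorem pv_per_i (B : PySem.Dict Int (List Int)) (hB : B.keys.Nodup) (i : Int) (row : List Int) :
    ((pvB_index B).getD (PySem.List.len row) []).map (fun q => ((i, q.1), pvB_dot row q.2))
    = (B.keys.filter (fun j => PySem.List.len row == PySem.List.len (B.getD j []))).map
        (fun j => ((i, j), pvA_dot row (B.getD j []))) := by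
  rw [pvB_index_getD, PySem.Dict.items_eq_map_keys B hB [], List.filter_map,
    List.filter_congr (fun j _ => by
      simp only [Function.comp_def]
      exact Bool.beq_comm ..), List.map_map]
  refine List.map_congr_left ?_
  intro j hj
  have hmem := List.of_mem_filter hj
  have hlen : row.length = (B.getD j []).length := by
    simp only [PySem.List.len_eq, beq_iff_eq, Nat.cast_inj] at hmem
    exact hmem
  simp [pv_dot_eq _ _ hlen]

-- ===== VERDICT (by name: the statement is the Claim_ definition above) =====
theorem reducer_part1_spec : Claim_equal_reducer_part1 := by
  intro key values _
  unfold Spec_reducer_part1 reducer_part1 reducer_part1_alt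
  rw [pvB_collect_eq, pvA_collect_eq]
  have hA := pvFA_nodup values
  have hB := pvFB_nodup values
  rw [pv_outer_items _ _ hB _ PySem.Dict.empty hA (by simp),
    PySem.List.foldl_append_eq_flatMap,
    PySem.Dict.items_eq_map_keys (values.foldl pvFA PySem.Dict.empty) hA [],
    List.flatMap_map]
  simp only [show (PySem.Dict.empty : PySem.Dict (Int × Int) Int).items = [] from rfl,
    List.nil_append, pv_per_i _ hB]
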